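-- pv_equiv track=rewrite | github.com/gewoonrik/duplicate_prs | DuplicatePRs/meta_data_scripts/get_descriptions.py | tokenize_description
-- ===== SOURCE A (Python) =====
-- def tokenize_description(description):
--     # keep the #, because that can sign for an issue or a PR
--     preprocessed = ''.join(e for e in description if e.isalnum() or e == '#' or e.isspace()).lower()
--     seq = []
--     curr = ""
--     # group all alpha characters, remove spaces/newlines
--     # tokenize each number as word and tokenize # as one word
--     for c in preprocessed:
--         if c.isalpha():
--             curr += c
--         else:
--             if curr != "":
--                 seq.append(curr)
--                 curr = ""
--             if not c.isspace() or c == '\n':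
--                 seq.append(c)
--     if curr != "":
--         seq.append(curr)
--     return [_f for _f in seq if _f]
-- ===== SOURCE B (Python) =====
-- def tokenize_description(description):
--     # keep the #, because that can sign for an issue or a PR
--     preprocessed = ''.join(e for e in description if e.isalnum() or e == '#' or e.isspace()).lower()
--     # ',' can never survive the preprocessing filter, so it is a safe separator:
--     # wrap every kept non-alpha char in separators, turn dropped whitespace into
--     # a separator, then split on the separator and drop the empty pieces.
--     marked = ''.join(
--         c if c.isalpha()
--         else (',' + c + ',' if (not c.isspace() or c == '\n') else ',')
--         for c in preprocessed)
--     return [t for t in marked.split(',') if t]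
-- ===== Notes on version B (the rewrite author's own statement) =====
-- stated objective: alternative
-- what changed: Replaces A's stateful accumulate-and-flush character loop by a sentinel-and-split pipeline: every kept non-alpha character is wrapped in ',' separators (a character the preprocessing filter can never keep), dropped whitespace becomes a bare separator, and the tokens are marked.split(',') with empty pieces removed.
import Mathlib
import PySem

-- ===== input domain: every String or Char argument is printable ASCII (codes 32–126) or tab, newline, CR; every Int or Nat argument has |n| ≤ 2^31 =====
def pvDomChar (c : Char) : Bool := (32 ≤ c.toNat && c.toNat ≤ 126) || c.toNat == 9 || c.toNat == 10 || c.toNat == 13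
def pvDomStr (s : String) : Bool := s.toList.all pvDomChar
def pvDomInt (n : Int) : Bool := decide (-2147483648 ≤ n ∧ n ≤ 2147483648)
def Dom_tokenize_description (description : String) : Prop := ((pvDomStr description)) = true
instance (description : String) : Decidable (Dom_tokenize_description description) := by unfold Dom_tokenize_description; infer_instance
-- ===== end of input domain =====

-- B replaces A's accumulate-and-flush loop by a sentinel-and-split pipeline:
-- kept non-alpha chars are wrapped in ',' separators (',' never survives the
-- preprocessing filter), then the tokens are split(',') minus empty pieces.

-- ===== PORT A =====
-- the body of A's `for c in preprocessed` loop; state = (seq, curr)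
def pvStepA (st : List String × List Char) (c : Char) : List String × List Char :=
  if PySem.Chars.isalpha c then (st.1, st.2 ++ [c])
  else
    let st1 := if st.2 ≠ [] then (st.1 ++ [String.ofList st.2], ([] : List Char)) else st
    if !PySem.Chars.isspace c || c == '\n' then (st1.1 ++ [String.ofList [c]], st1.2) else st1

-- A's trailing `if curr != "": seq.append(curr)`
def pvFinishA (r : List String × List Char) : List String :=
  if r.2 ≠ [] then r.1 ++ [String.ofList r.2] else r.1

def tokenize_description (description : String) : List String :=
  (pvFinishA ((PySem.Chars.lower
      (description.toList.filter (fun e => PySem.Chars.isalnum e || e == '#' || PySem.Chars.isspace e))).foldl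
      pvStepA ([], []))).filter (fun f => f != "")

-- ===== PORT B =====
-- the per-character marking of Source B's `marked = ''.join(... for c in preprocessed)`
def pvMarkChar (c : Char) : List Char :=
  if PySem.Chars.isalpha c then [c]
  else if !PySem.Chars.isspace c || c == '\n' then [','] ++ [c] ++ [','] else [',']

def tokenize_description_alt (description : String) : List String :=
  ((PySem.Chars.splitOn
      ((PySem.Chars.lower
          (description.toList.filter
            (fun e => PySem.Chars.isalnum e || e == '#' || PySem.Chars.isspace e))).flatMap
        pvMarkChar) [',']).map String.ofList).filter (fun t => t != "")

-- ===== PRECONDITION & SPEC =====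
def Spec_tokenize_description (description : String) (out : List String) : Prop := out = tokenize_description_alt description
instance (description : String) (out : List String) : Decidable (Spec_tokenize_description description out) := by unfold Spec_tokenize_description; infer_instance

-- ===== CLAIM (what is proved, stated in full; the proofs are below) =====
def Claim_equal_tokenize_description : Prop := ∀ (description : String), Dom_tokenize_description description → Spec_tokenize_description description (tokenize_description description)

-- ===== LEMMAS AND PROOFS =====

-- recursive model of A's loop (+ final flush), with pending word `curr`
def pvAModel : List Char → List Char → List String
  | [], curr => if curr ≠ [] then [String.ofList curr] else []
  | c :: rest, curr =>
    if PySem.Chars.isalpha c then pvAModel rest (curr ++ [c])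
    else (if curr ≠ [] then [String.ofList curr] else []) ++
         (if !PySem.Chars.isspace c || c == '\n' then [String.ofList [c]] else []) ++
         pvAModel rest []

theorem pvFoldl_eq_amodel (cs : List Char) : ∀ (seq : List String) (curr : List Char),
    pvFinishA (cs.foldl pvStepA (seq, curr)) = seq ++ pvAModel cs curr := by
  induction cs with
  | nil =>
    intro seq curr
    simp only [List.foldl_nil, pvFinishA, pvAModel]
    split_ifs <;> simp
  | cons c rest ih =>
    intro seq curr
    simp only [List.foldl_cons, pvAModel]
    by_cases ha : PySem.Chars.isalpha c
    · rw [show pvStepA (seq, curr) c = (seq, curr ++ [c]) by simp [pvStepA, ha]]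
      rw [ih seq (curr ++ [c])]
      simp [ha]
    · by_cases hc : curr ≠ [] <;> by_cases he : (!PySem.Chars.isspace c || c == '\n') = true
      · rw [show pvStepA (seq, curr) c = (seq ++ [String.ofList curr] ++ [String.ofList [c]], []) by
          simp [pvStepA, ha, hc, he]]
        rw [ih _ []]
        simp [ha, hc, he]
      · rw [show pvStepA (seq, curr) c = (seq ++ [String.ofList curr], []) by
          simp [pvStepA, ha, hc, he]]
        rw [ih _ []]
        simp [ha, hc, he]
      · rw [show pvStepA (seq, curr) c = (seq ++ [String.ofList [c]], curr) by
          simp [pvStepA, ha, hc, he]]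
        have hc' : curr = [] := by simpa using hc
        subst hc'
        rw [ih _ []]
        simp [ha, he]
      · rw [show pvStepA (seq, curr) c = (seq, curr) by simp [pvStepA, ha, hc, he]]
        have hc' : curr = [] := by simpa using hc
        subst hc'
        rw [ih _ []]
        simp [ha, he]

theorem pvOfList_ne_empty (l : List Char) (h : l ≠ []) : String.ofList l ≠ "" := by
  intro he
  apply h
  have := congrArg String.toList he
  simpa using this

theorem pvAModel_no_empty (cs : List Char) : ∀ curr, "" ∉ pvAModel cs curr := by
  induction cs with
  | nil =>
    intro curr; simp only [pvAModel]
    split_ifs with h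
    · intro hmem
      simp only [List.mem_singleton] at hmem
      exact pvOfList_ne_empty curr h hmem.symm
    · simp
  | cons c rest ih =>
    intro curr
    simp only [pvAModel]
    by_cases ha : PySem.Chars.isalpha c
    · simp only [ha, if_true]; exact ih _
    · simp only [ha, Bool.false_eq_true, if_false, List.mem_append]
      rintro (⟨h | h⟩ | h)
      · revert h; split_ifs with hc
        · intro hmem
          simp only [List.mem_singleton] at hmem
          exact pvOfList_ne_empty curr hc hmem.symm
        · simp
      · revert h; split_ifs with he
        · intro hmem
          simp only [List.mem_singleton] at hmem
          exact pvOfList_ne_empty [c] (by simp) hmem.symm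
        · simp
      · exact ih _ h

-- simple recursive model of str.split(',') (pre = piece built so far)
def pvSplitC : List Char → List Char → List (List Char)
  | pre, [] => [pre]
  | pre, c :: rest => if c = ',' then pre :: pvSplitC [] rest else pvSplitC (pre ++ [c]) rest

theorem pvGo_eq_splitC (l : List Char) : ∀ (fuel : Nat) (cur : List Char) (acc : List (List Char)),
    l.length ≤ fuel →
    PySem.Chars.splitOn.go [','] fuel l cur acc = acc.reverse ++ pvSplitC cur.reverse l := by
  induction l with
  | nil =>
    intro fuel cur acc _
    cases fuel <;> simp [PySem.Chars.splitOn.go, pvSplitC]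
  | cons c rest ih =>
    intro fuel cur acc hf
    cases fuel with
    | zero => simp at hf
    | succ n =>
      by_cases hc : c = ','
      · subst hc
        rw [show PySem.Chars.splitOn.go [','] (n+1) (',' :: rest) cur acc
            = PySem.Chars.splitOn.go [','] n rest [] (cur.reverse :: acc) by
          simp [PySem.Chars.splitOn.go, List.isPrefixOf]]
        rw [ih n [] (cur.reverse :: acc) (by simpa using Nat.lt_succ_iff.mp (by simpa using hf))]
        simp [pvSplitC]
      · rw [show PySem.Chars.splitOn.go [','] (n+1) (c :: rest) cur acc
            = PySem.Chars.splitOn.go [','] n rest (c :: cur) acc by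
          simp only [PySem.Chars.splitOn.go, List.isPrefixOf,
            Bool.and_true, beq_iff_eq]
          rw [if_neg (fun h => hc h.symm)]]
        rw [ih n (c :: cur) acc (by simpa using Nat.lt_succ_iff.mp (by simpa using hf))]
        simp [pvSplitC, hc]

theorem pvSplitOn_eq_splitC (l : List Char) :
    PySem.Chars.splitOn l [','] = pvSplitC [] l := by
  rw [PySem.Chars.splitOn, pvGo_eq_splitC l (l.length + 1) [] [] (Nat.le_succ _)]
  simp

-- the main bridge: A's model over cs = filtered pieces of B's marked string
theorem pvMain (cs : List Char) : ∀ curr, (∀ d ∈ cs, d ≠ ',') →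
    pvAModel cs curr =
      ((pvSplitC curr (cs.flatMap pvMarkChar)).filter (fun l => !l.isEmpty)).map String.ofList := by
  induction cs with
  | nil =>
    intro curr _
    simp only [List.flatMap_nil, pvSplitC, pvAModel]
    by_cases h : curr = [] <;> simp [h]
  | cons c rest ih =>
    intro curr hnc
    have hc : c ≠ ',' := hnc c (by simp)
    have hrest : ∀ d ∈ rest, d ≠ ',' := fun d hd => hnc d (by simp [hd])
    simp only [List.flatMap_cons, pvAModel, pvMarkChar]
    by_cases ha : PySem.Chars.isalpha c
    · simp only [ha, if_true, List.singleton_append, pvSplitC, hc, if_false]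
      exact ih (curr ++ [c]) hrest
    · simp only [ha, Bool.false_eq_true, if_false]
      by_cases he : (!PySem.Chars.isspace c || c == '\n') = true
      · simp only [he, if_true, List.append_assoc, List.cons_append, List.nil_append, pvSplitC,
          hc, if_false]
        rw [ih [] hrest]
        by_cases hcu : curr = [] <;> simp [hcu]
      · simp only [he, Bool.false_eq_true, if_false, List.cons_append, List.nil_append, pvSplitC]
        rw [ih [] hrest]
        by_cases hcu : curr = [] <;> simp [hcu]

-- map-then-filter on strings = filter-then-map on char lists
theorem pvMapFilter (ls : List (List Char)) :
    (ls.map String.ofList).filter (fun t => t != "") =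
      (ls.filter (fun l => !l.isEmpty)).map String.ofList := by
  induction ls with
  | nil => rfl
  | cons l t ih =>
    by_cases h : l = []
    · subst h; simpa using ih
    · simp only [List.map_cons, List.filter_cons]
      rw [if_pos (by simpa using pvOfList_ne_empty l h), if_pos (by simpa using h)]
      simp [ih]

-- no character of the preprocessed string is the ',' sentinel
theorem pvLower_ne_comma (c : Char)
    (h : (PySem.Chars.isalnum c || c == '#' || PySem.Chars.isspace c) = true) :
    PySem.Chars.lowerChar c ≠ ',' := by
  unfold PySem.Chars.lowerChar
  by_cases hu : PySem.Chars.isupper c = true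
  · rw [if_pos hu]
    intro he
    have := congrArg Char.toNat he
    rw [Char.toNat_ofNat] at this
    split_ifs at this
    · have h1 : ('A' : Char) ≤ c ∧ c ≤ ('Z' : Char) := by
        simpa [PySem.Chars.isupper] using hu
      have h2 : 65 ≤ c.toNat ∧ c.toNat ≤ 90 := by
        obtain ⟨ha, hb⟩ := h1
        rw [Char.le_def] at ha hb
        exact ⟨ha, hb⟩
      simp only [show (',' : Char).toNat = 44 from rfl] at this
      omega
    · simp [show (',' : Char).toNat = 44 from rfl] at this
  · rw [if_neg hu]
    intro he
    subst he
    exact absurd h (by decide)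

-- ===== VERDICT (by name: the statement is the Claim_ definition above) =====
theorem tokenize_description_spec : Claim_equal_tokenize_description := by
  intro description _
  unfold Spec_tokenize_description tokenize_description tokenize_description_alt
  rw [pvFoldl_eq_amodel _ [] [], List.nil_append]
  have hnc : ∀ d ∈ PySem.Chars.lower
      (description.toList.filter (fun e => PySem.Chars.isalnum e || e == '#' || PySem.Chars.isspace e)),
      d ≠ ',' := by
    intro d hd
    simp only [PySem.Chars.lower, List.mem_map] at hd
    obtain ⟨e, he, hde⟩ := hd
    subst hde
    exact pvLower_ne_comma e (List.mem_filter.mp he).2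
  rw [pvSplitOn_eq_splitC, pvMapFilter, ← pvMain _ [] hnc]
  rw [List.filter_eq_self.mpr]
  intro s hs
  simp only [bne_iff_ne, ne_eq]
  intro he
  subst he
  exact pvAModel_no_empty _ [] hs
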